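-- pv_equiv track=rewrite | github.com/paiml/depyler | examples/hard_checkdigit.py | verhoeff_digit_sum
-- ===== SOURCE A (Python) =====
-- def verhoeff_digit_sum(n: int) -> int:
--     """Simple alternating digit sum for verification."""
--     val: int = n
--     if val < 0:
--         val = -val
--     total: int = 0
--     pos: int = 0
--     while val > 0:
--         d: int = val % 10
--         if pos % 2 == 0:
--             total = total + d
--         else:
--             total = total - d
--         val = val // 10
--         pos = pos + 1
--     if total < 0:
--         total = -total
--     return total % 10
-- ===== SOURCE B (Python) =====
-- def verhoeff_digit_sum(n: int) -> int:
--     """Simple alternating digit sum for verification."""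
--     digits = [ord(c) - 48 for c in str(abs(n))[::-1]]
--     total = sum(digits[0::2]) - sum(digits[1::2])
--     return abs(total) % 10
-- ===== Notes on version B (the rewrite author's own statement) =====
-- stated objective: simpler
-- what changed: Replaces the branchy while-loop with mutable total/pos counters by building the digit list once from str(abs(n)) reversed and subtracting the odd-index slice sum from the even-index slice sum.
import Mathlib
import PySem

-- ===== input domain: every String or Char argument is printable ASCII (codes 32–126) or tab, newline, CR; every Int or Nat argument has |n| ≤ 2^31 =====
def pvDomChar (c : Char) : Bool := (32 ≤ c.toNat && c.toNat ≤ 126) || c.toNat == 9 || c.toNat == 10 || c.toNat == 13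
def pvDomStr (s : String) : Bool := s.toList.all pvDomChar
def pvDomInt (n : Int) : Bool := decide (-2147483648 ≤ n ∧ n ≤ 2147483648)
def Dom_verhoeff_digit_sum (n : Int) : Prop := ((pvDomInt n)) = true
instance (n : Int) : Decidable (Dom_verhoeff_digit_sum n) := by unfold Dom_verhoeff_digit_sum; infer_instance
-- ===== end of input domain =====

-- B rebuilds the alternating digit sum from str(abs(n)) reversed with even/odd index slices
-- instead of A's branchy while-loop with mutable total/pos counters (objective: simpler).


-- ===== PORT A =====
-- the while loop of A: state (val, total, pos)
def vLoop (val total : Int) (pos : Nat) : Int :=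
  if h : 0 < val then
    let d : Int := PySem.Int.mod val 10
    vLoop (PySem.Int.floordiv val 10)
      (if pos % 2 = 0 then total + d else total - d) (pos + 1)
  else total
termination_by val.toNat
decreasing_by
  rw [PySem.Int.floordiv_eq_ediv_of_pos (by norm_num)]
  omega

def verhoeff_digit_sum (n : Int) : Int :=
  let val : Int := if n < 0 then -n else n
  let total : Int := vLoop val 0 0
  let total' : Int := if total < 0 then -total else total
  PySem.Int.mod total' 10

-- ===== PORT B =====
def verhoeff_digit_sum_alt (n : Int) : Int :=
  -- digits = [ord(c) - 48 for c in str(abs(n))[::-1]]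
  let s : List Char := PySem.Int.toChars ((n.natAbs : Int))
  let cs : List Char := (PySem.List.slice? s none none (-1)).getD []
  let digits : List Int := cs.map (fun c => ((c.toNat : Int) - 48))
  -- total = sum(digits[0::2]) - sum(digits[1::2])
  let total : Int := ((PySem.List.slice? digits (some 0) none 2).getD []).sum
                   - ((PySem.List.slice? digits (some 1) none 2).getD []).sum
  -- return abs(total) % 10
  PySem.Int.mod |total| 10

-- ===== PRECONDITION & SPEC =====
def Spec_verhoeff_digit_sum (n : Int) (out : Int) : Prop := out = verhoeff_digit_sum_alt n
instance (n : Int) (out : Int) : Decidable (Spec_verhoeff_digit_sum n out) := by unfold Spec_verhoeff_digit_sum; infer_instance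

-- ===== CLAIM (what is proved, stated in full; the proofs are below) =====
def Claim_equal_verhoeff_digit_sum : Prop := ∀ (n : Int), Dom_verhoeff_digit_sum n → Spec_verhoeff_digit_sum n (verhoeff_digit_sum n)

-- ===== LEMMAS AND PROOFS =====

-- elements at even indices (0,2,4,…) of a list
def evens : List Int → List Int
  | [] => []
  | [x] => [x]
  | x :: _ :: xs => x :: evens xs

-- elements at odd indices (1,3,5,…)
def odds : List Int → List Int
  | [] => []
  | [_] => []
  | _ :: y :: xs => y :: odds xs

-- alternating sum, head positive
def altSum : List Int → Int
  | [] => 0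
  | d :: ds => d - altSum ds

lemma altSum_eq_evens_sub_odds (ds : List Int) :
    altSum ds = (evens ds).sum - (odds ds).sum := by
  induction ds using evens.induct with
  | case1 => simp [altSum, evens, odds]
  | case2 x => simp [altSum, evens, odds]
  | case3 x y xs ih => simp [altSum, evens, odds]; omega

lemma filterMap_evens : ∀ (xs : List Int),
    List.filterMap (fun k => xs[2 * k]?) (List.range ((xs.length + 1) / 2)) = evens xs := by
  intro xs
  induction xs using evens.induct with
  | case1 => simp [evens]
  | case2 x => simp [evens]
  | case3 x y xs ih =>
    have hc : (((x :: y :: xs).length + 1) / 2) = (xs.length + 1) / 2 + 1 := by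
      simp; omega
    have hf : ((fun k => (x :: y :: xs)[2 * k]?) ∘ (· + 1)) = fun k => xs[2 * k]? := by
      funext k
      have h2 : 2 * (k + 1) = (2 * k) + 1 + 1 := by omega
      simp [Function.comp, h2]
    rw [hc, List.range_succ_eq_map, List.filterMap_cons, List.filterMap_map, hf, ih]
    simp [evens]

lemma odds_cons (x : Int) (l : List Int) : odds (x :: l) = evens l := by
  induction l using evens.induct generalizing x with
  | case1 => simp [odds, evens]
  | case2 y => simp [odds, evens]
  | case3 y z l ih => simp [odds, evens, ih]

lemma slice_evens (xs : List Int) :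
    PySem.List.slice? xs (some 0) none 2 = some (evens xs) := by
  simp only [PySem.List.slice?, PySem.List.sliceIndices]
  norm_num
  rw [show (if 0 < xs.length then (((xs.length : Int) + 2 - 1) / 2).toNat else 0)
        = (xs.length + 1) / 2 from by split <;> omega]
  rw [← filterMap_evens xs]
  apply List.filterMap_congr
  intro k _
  have h1 : ((2 : Int) * (k : Int)).toNat = 2 * k := by omega
  rw [h1]

lemma slice_odds (xs : List Int) :
    PySem.List.slice? xs (some 1) none 2 = some (odds xs) := by
  cases xs with
  | nil => decide
  | cons x rest =>
    simp only [PySem.List.slice?, PySem.List.sliceIndices]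
    norm_num
    rw [show (if 0 < rest.length then (((rest.length : Int) + 2 - 1) / 2).toNat else 0)
          = (rest.length + 1) / 2 from by split <;> omega]
    rw [odds_cons, ← filterMap_evens rest]
    apply List.filterMap_congr
    intro k _
    have h1 : ((1 : Int) + 2 * (k : Int)).toNat = 2 * k + 1 := by omega
    rw [h1, List.getElem?_cons_succ]

-- the digit list (least significant last) Python's str produces for m ≥ 0: ['0'] for 0
def dig0 (m : Nat) : List Nat := if m = 0 then [0] else Nat.digits 10 m

lemma dig0_small {n : Nat} (h : n / 10 = 0) : dig0 n = [n % 10] := by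
  by_cases hn : n = 0
  · subst hn; simp [dig0]
  · rw [dig0, if_neg hn, Nat.digits_def' (by norm_num) (Nat.pos_of_ne_zero hn), h]
    simp [Nat.mod_eq_of_lt (by omega : n < 10)]

lemma toDigitsCore_eq (f : Nat) : ∀ (n : Nat) (acc : List Char), n < 10 ^ (f + 1) →
    Nat.toDigitsCore 10 (f + 1) n acc = ((dig0 n).map Nat.digitChar).reverse ++ acc := by
  induction f with
  | zero =>
    intro n acc h
    have hd : n / 10 = 0 := by omega
    rw [Nat.toDigitsCore, if_pos hd, dig0_small hd]
    simp
  | succ f ih =>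
    intro n acc h
    rw [Nat.toDigitsCore]
    by_cases hd : n / 10 = 0
    · rw [if_pos hd, dig0_small hd]; simp
    · rw [if_neg hd]
      have hn : n ≠ 0 := by omega
      have hlt : n / 10 < 10 ^ (f + 1) := by
        apply Nat.div_lt_of_lt_mul
        calc n < 10 ^ (f + 1 + 1) := h
        _ = 10 * 10 ^ (f + 1) := by ring
      rw [ih (n / 10) _ hlt]
      have e2 : dig0 (n / 10) = Nat.digits 10 (n / 10) := by rw [dig0, if_neg hd]
      have e1 : dig0 n = n % 10 :: Nat.digits 10 (n / 10) := by
        rw [dig0, if_neg hn]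
        exact Nat.digits_def' (by norm_num) (Nat.pos_of_ne_zero hn)
      rw [e2, e1]
      simp

lemma toChars_nat (m : Nat) :
    PySem.Int.toChars (m : Int) = ((dig0 m).map Nat.digitChar).reverse := by
  rw [PySem.Int.toChars, if_neg (by omega)]
  have h1 : ((m : Int)).toNat = m := by omega
  rw [h1, Nat.toDigits]
  have h2 : m < 10 ^ (m + 1) := by
    calc m < 10 ^ m := Nat.lt_pow_self (by norm_num)
    _ ≤ 10 ^ (m + 1) := Nat.pow_le_pow_right (by norm_num) (by omega)
  rw [toDigitsCore_eq m m [] h2]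
  simp

lemma digitChar_val {d : Nat} (h : d < 10) :
    ((Nat.digitChar d).toNat : Int) - 48 = (d : Int) := by
  revert h; revert d; decide

lemma dig0_lt (m : Nat) : ∀ d ∈ dig0 m, d < 10 := by
  intro d hd
  by_cases hm : m = 0
  · subst hm; simp [dig0] at hd; omega
  · rw [dig0, if_neg hm] at hd
    exact Nat.digits_lt_base (by norm_num) hd

lemma vLoop_eq (m : Nat) : ∀ (total : Int) (pos : Nat),
    vLoop (m : Int) total pos =
      total + (if pos % 2 = 0 then (1 : Int) else -1)
        * altSum ((Nat.digits 10 m).map (Nat.cast : Nat → Int)) := by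
  induction m using Nat.strong_induction_on with
  | _ m ih =>
    intro total pos
    rw [vLoop]
    by_cases hm : m = 0
    · subst hm
      rw [dif_neg (by omega)]
      simp [altSum]
    · rw [dif_pos (by omega : (0:Int) < (m:Int))]
      have hmod : PySem.Int.mod (m : Int) 10 = ((m % 10 : Nat) : Int) := by
        exact_mod_cast PySem.Int.mod_natCast m 10
      have hdiv : PySem.Int.floordiv (m : Int) 10 = ((m / 10 : Nat) : Int) := by
        exact_mod_cast PySem.Int.floordiv_natCast m 10
      rw [hmod, hdiv, ih (m / 10) (Nat.div_lt_self (Nat.pos_of_ne_zero hm) (by norm_num))]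
      rw [Nat.digits_def' (by norm_num : (1:Nat) < 10) (Nat.pos_of_ne_zero hm)]
      simp only [List.map_cons, altSum]
      have hp : (pos + 1) % 2 = if pos % 2 = 0 then 1 else 0 := by
        split <;> omega
      by_cases hpe : pos % 2 = 0
      · simp only [hpe, hp, if_pos]
        norm_num
        ring
      · simp only [hpe, hp]
        norm_num [hpe]
        ring

lemma altSum_dig0 (m : Nat) :
    altSum ((dig0 m).map (Nat.cast : Nat → Int)) =
      altSum ((Nat.digits 10 m).map (Nat.cast : Nat → Int)) := by
  by_cases hm : m = 0
  · subst hm; simp [dig0, altSum]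
  · rw [dig0, if_neg hm]

-- ===== VERDICT (by name: the statement is the Claim_ definition above) =====
theorem verhoeff_digit_sum_spec : Claim_equal_verhoeff_digit_sum := by
  intro n _
  unfold Spec_verhoeff_digit_sum verhoeff_digit_sum verhoeff_digit_sum_alt
  set m : Nat := n.natAbs with hm
  have hval : (if n < 0 then -n else n) = (m : Int) := by
    rw [hm]; split <;> omega
  rw [hval]
  dsimp only
  -- B's char list: reversed str(abs n)
  rw [PySem.List.slice?_none_none_neg_one, toChars_nat m]
  simp only [Option.getD_some, List.reverse_reverse]
  -- B's digit list equals the numeric digits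
  have hdl : ((dig0 m).map Nat.digitChar).map (fun c => ((c.toNat : Int) - 48))
      = (dig0 m).map (Nat.cast : Nat → Int) := by
    rw [List.map_map]
    apply List.map_congr_left
    intro d hd
    exact digitChar_val (dig0_lt m d hd)
  rw [hdl]
  rw [slice_evens, slice_odds]
  simp only [Option.getD_some]
  rw [← altSum_eq_evens_sub_odds]
  rw [altSum_dig0]
  rw [vLoop_eq m 0 0]
  simp only [Nat.zero_mod, if_pos, one_mul, zero_add]
  congr 1
  set t : Int := altSum ((Nat.digits 10 m).map (Nat.cast : Nat → Int))
  rcases lt_or_ge t 0 with h | h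
  · rw [if_pos h, abs_of_neg h]
  · rw [if_neg (by omega), abs_of_nonneg h]
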